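-- pv_equiv track=rewrite | github.com/hongyiheng/lc-base-on-doocs | Hash Table/3755.Find Maximum Balanced XOR Subarray Length/Solution.py | maxBalancedSubarray
-- ===== SOURCE A (Python) =====
-- from typing import List
--
-- def maxBalancedSubarray(nums: List[int]) -> int:
--     g = dict()
--     g[(0, 0)] = -1
--     ans = s = msk = 0
--     for i, v in enumerate(nums):
--         msk ^= v
--         s += 1 if v % 2 else -1
--         k = (msk, s)
--         if k in g:
--             ans = max(ans, i - g[k])
--         else:
--             g[k] = i
--     return ans
-- ===== SOURCE B (Python) =====
-- from typing import List
--
-- def maxBalancedSubarray(nums: List[int]) -> int: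
--     # Sort-and-group over prefix states instead of a first-occurrence hash map.
--     pairs = [((0, 0), -1)]
--     msk = s = 0
--     for i, v in enumerate(nums):
--         msk ^= v
--         s += 1 if v & 1 else -1
--         pairs.append(((msk, s), i))
--     pairs.sort(key=lambda p: p[0])  # stable: equal states keep ascending indices
--     (st, first), ans = pairs[0], 0
--     for k, idx in pairs[1:]:
--         if k == st:
--             ans = max(ans, idx - first)
--         else:
--             st, first = k, idx
--     return ans
-- ===== Notes on version B (the rewrite author's own statement) =====
-- stated objective: alternative
-- what changed: Replaces the online first-occurrence hash map with materializing all (xor,parity) prefix states paired with their indices, stably sorting them by state, and taking the maximum index span within each run of equal states.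
import Mathlib
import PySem

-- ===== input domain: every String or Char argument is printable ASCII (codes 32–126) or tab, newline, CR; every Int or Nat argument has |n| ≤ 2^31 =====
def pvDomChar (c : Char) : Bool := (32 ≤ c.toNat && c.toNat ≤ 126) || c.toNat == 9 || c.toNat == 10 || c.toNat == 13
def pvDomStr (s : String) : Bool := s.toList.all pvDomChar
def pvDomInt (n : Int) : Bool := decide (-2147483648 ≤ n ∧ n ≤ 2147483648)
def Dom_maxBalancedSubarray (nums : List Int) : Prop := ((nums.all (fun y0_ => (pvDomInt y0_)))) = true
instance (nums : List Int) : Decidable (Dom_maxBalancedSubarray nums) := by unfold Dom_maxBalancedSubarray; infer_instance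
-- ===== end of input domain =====

-- B replaces A's online first-occurrence hash map by materializing all (xor,parity) prefix
-- states with indices, stably sorting by state and scanning runs (alternative algorithm, not faster).

-- ===== PORT A =====
def maxBalancedSubarray (nums : List Int) : Int :=
  -- g = {(0,0): -1}; ans = s = msk = 0; for i, v in enumerate(nums): …
  let g0 : PySem.Dict (Int × Int) Int := PySem.Dict.empty.insert (0, 0) (-1)
  let r := (PySem.List.enumerate nums).foldl
    (fun (acc : PySem.Dict (Int × Int) Int × Int × Int × Int) iv =>
      let g := acc.1
      let ans := acc.2.1
      let msk := PySem.Int.bxor acc.2.2.2 iv.2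
      let s := acc.2.2.1 + (if PySem.Int.mod iv.2 2 ≠ 0 then 1 else -1)
      let k := (msk, s)
      if g.contains k then (g, max ans (iv.1 - g.getD k 0), s, msk)
      else (g.insert k iv.1, ans, s, msk))
    (g0, 0, 0, 0)
  r.2.1

-- ===== PORT B =====
def maxBalancedSubarray_alt (nums : List Int) : Int :=
  -- pairs = [((0,0), -1)]; build one (state, index) pair per element
  let r := (PySem.List.enumerate nums).foldl
    (fun (acc : Int × Int × List ((Int × Int) × Int)) iv =>
      let msk := PySem.Int.bxor acc.1 iv.2
      let s := acc.2.1 + (if PySem.Int.band iv.2 1 ≠ 0 then 1 else -1)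
      (msk, s, acc.2.2 ++ [((msk, s), iv.1)]))
    (0, 0, [((0, 0), -1)])
  -- pairs.sort(key=lambda p: p[0])  (stable)
  let sp := PySem.List.sorted2 r.2.2 (fun p => p.1.1) (fun p => p.1.2)
  -- (st, first), ans = pairs[0], 0; scan runs of equal states
  match sp with
  | [] => 0  -- unreachable: the pairs list always holds the ((0,0),-1) sentinel
  | h :: t =>
    (t.foldl
      (fun (acc : (Int × Int) × Int × Int) p =>
        if p.1 == acc.1 then (acc.1, acc.2.1, max acc.2.2 (p.2 - acc.2.1))
        else (p.1, p.2, acc.2.2))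
      (h.1, h.2, 0)).2.2

-- ===== PRECONDITION & SPEC =====
def Spec_maxBalancedSubarray (nums : List Int) (out : Int) : Prop := out = maxBalancedSubarray_alt nums
instance (nums : List Int) (out : Int) : Decidable (Spec_maxBalancedSubarray nums out) := by unfold Spec_maxBalancedSubarray; infer_instance

-- ===== CLAIM (what is proved, stated in full; the proofs are below) =====
def Claim_equal_maxBalancedSubarray : Prop := ∀ (nums : List Int), Dom_maxBalancedSubarray nums → Spec_maxBalancedSubarray nums (maxBalancedSubarray nums)

-- ===== LEMMAS AND PROOFS =====

-- A (state, index) pair of prefix state and Python index.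
abbrev PvP : Type := (Int × Int) × Int

-- The stream of (state, index) pairs produced from `l` starting at xor `msk`, parity `s`, index `i`.
def pvPairs (msk s i : Int) : List Int → List PvP
  | [] => []
  | v :: t =>
    let m := PySem.Int.bxor msk v
    let s' := s + (if PySem.Int.band v 1 ≠ 0 then 1 else -1)
    ((m, s'), i) :: pvPairs m s' (i + 1) t

-- index paired with the first occurrence of state `st` in `ps` (0 if absent)
def pvFirst (ps : List PvP) (st : Int × Int) : Int :=
  (((ps.find? (fun q => q.1 == st)).map (fun q => q.2)).getD 0)

-- the common specification value: max over elements of (index - first index of its state)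
def pvS (ps : List PvP) : Int :=
  ps.foldl (fun a p => max a (p.2 - pvFirst ps p.1)) 0

-- A's loop as a recursion over the pair stream
def pvDictScan (g : PySem.Dict (Int × Int) Int) (ans : Int) : List PvP → Int
  | [] => ans
  | p :: t =>
    if g.contains p.1 then pvDictScan g (max ans (p.2 - g.getD p.1 0)) t
    else pvDictScan (g.insert p.1 p.2) ans t

-- the comparison sorted2 uses (reverse = false), on state pairs
def pvBef (a b : PvP) : Bool :=
  decide (a.1.1 < b.1.1) || (!decide (b.1.1 < a.1.1) && decide (a.1.2 < b.1.2))


theorem pvA_loop (l : List Int) : ∀ (i msk s : Int) (g : PySem.Dict (Int × Int) Int) (ans : Int),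
    ((PySem.List.enumerate l i).foldl
      (fun (acc : PySem.Dict (Int × Int) Int × Int × Int × Int) iv =>
        let g := acc.1
        let ans := acc.2.1
        let msk := PySem.Int.bxor acc.2.2.2 iv.2
        let s := acc.2.2.1 + (if PySem.Int.mod iv.2 2 ≠ 0 then 1 else -1)
        let k := (msk, s)
        if g.contains k then (g, max ans (iv.1 - g.getD k 0), s, msk)
        else (g.insert k iv.1, ans, s, msk))
      (g, ans, s, msk)).2.1 = pvDictScan g ans (pvPairs msk s i l) := by
  induction l with
  | nil => intro i msk s g ans; simp [pvPairs, pvDictScan, PySem.List.enumerate]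
  | cons v t ih =>
    intro i msk s g ans
    rw [PySem.List.enumerate_cons]
    simp only [List.foldl_cons, pvPairs, pvDictScan, PySem.Int.band_one]
    by_cases h : PySem.Int.mod v 2 ≠ 0 <;> simp only [h, if_true, if_false, ite_true, ite_false, ne_eq, not_true, not_false_iff] <;>
      split <;> simp_all [ih]

theorem pvB_loop (l : List Int) : ∀ (i msk s : Int) (acc : List PvP),
    ((PySem.List.enumerate l i).foldl
      (fun (acc : Int × Int × List PvP) iv =>
        let msk := PySem.Int.bxor acc.1 iv.2
        let s := acc.2.1 + (if PySem.Int.band iv.2 1 ≠ 0 then 1 else -1)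
        (msk, s, acc.2.2 ++ [((msk, s), iv.1)]))
      (msk, s, acc)).2.2 = acc ++ pvPairs msk s i l := by
  induction l with
  | nil => intro i msk s acc; simp [pvPairs, PySem.List.enumerate]
  | cons v t ih =>
    intro i msk s acc
    rw [PySem.List.enumerate_cons]
    simp only [List.foldl_cons, pvPairs]
    rw [ih]
    simp



theorem pvFind_single_ne (p : PvP) (st : Int × Int) (h : p.1 ≠ st) :
    List.find? (fun q => q.1 == st) [p] = none := by
  rw [List.find?_cons_of_neg (by simp [h])]
  rfl

theorem pvFind_single_eq (p : PvP) : List.find? (fun q => q.1 == p.1) [p] = some p := by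
  rw [List.find?_cons_of_pos (by simp)]

theorem pvDictScan_spec (full : List PvP) : ∀ (ps C : List PvP) (g : PySem.Dict (Int × Int) Int) (ans : Int),
    C ++ ps = full →
    (∀ st, g.get? st = ((C.find? (fun q => q.1 == st)).map (fun q => q.2))) →
    0 ≤ ans →
    pvDictScan g ans ps = ps.foldl (fun a p => max a (p.2 - pvFirst full p.1)) ans := by
  intro ps
  induction ps with
  | nil => intro C g ans _ _ _; simp [pvDictScan]
  | cons p t ih =>
    intro C g ans hfull hg hans
    by_cases hc : g.contains p.1
    · have hsome : (g.get? p.1).isSome := by rw [← PySem.Dict.contains_eq_isSome_get?]; exact hc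
      obtain ⟨q, hq⟩ : ∃ q, C.find? (fun q => q.1 == p.1) = some q := by
        rw [hg p.1] at hsome
        cases hfind : C.find? (fun q => q.1 == p.1) with
        | none => rw [hfind] at hsome; simp at hsome
        | some q => exact ⟨q, rfl⟩
      have hfirst : pvFirst full p.1 = q.2 := by
        unfold pvFirst
        rw [← hfull, List.find?_append, hq]
        rfl
      have hgetD : g.getD p.1 0 = q.2 := by
        rw [PySem.Dict.getD_eq_get?_getD, hg p.1, hq]
        rfl
      simp only [pvDictScan, hc, if_true, List.foldl_cons]
      rw [ih (C ++ [p]) g (max ans (p.2 - g.getD p.1 0)) (by rw [← hfull]; simp) ?_ (le_max_of_le_left hans)]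
      · rw [hgetD, hfirst]
      · intro st
        rw [hg st, List.find?_append]
        by_cases hst : p.1 = st
        · subst hst
          rw [hq]; rfl
        · rw [pvFind_single_ne p st hst, Option.or_none]
    · have hnone : g.get? p.1 = none := by
        rw [PySem.Dict.get?_eq_none_iff_contains]
        simpa using hc
      have hCnone : C.find? (fun q => q.1 == p.1) = none := by
        have := hg p.1
        rw [hnone] at this
        cases hfind : C.find? (fun q => q.1 == p.1) with
        | none => rfl
        | some q => rw [hfind] at this; simp at this
      have hfirst : pvFirst full p.1 = p.2 := by
        unfold pvFirst
        rw [← hfull, List.find?_append, hCnone, Option.none_or, List.find?_cons_of_pos (by simp)]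
        rfl
      simp only [pvDictScan, hc, if_false, List.foldl_cons]
      rw [ih (C ++ [p]) (g.insert p.1 p.2) ans (by rw [← hfull]; simp) ?_ hans]
      · rw [hfirst]
        have h2 : max ans (p.2 - p.2) = ans := by omega
        rw [h2]
        simp
      · intro st
        rw [PySem.Dict.get?_insert, List.find?_append, hg st]
        by_cases hst : st = p.1
        · subst hst
          rw [hCnone, Option.none_or, pvFind_single_eq]
          simp
        · rw [pvFind_single_ne p st (fun h => hst h.symm), Option.or_none]
          simp [hst]

theorem pvA_eq_S (nums : List Int) :
    maxBalancedSubarray nums = pvS (((0, 0), -1) :: pvPairs 0 0 0 nums) := by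
  unfold maxBalancedSubarray
  rw [pvA_loop]
  have h0 : pvDictScan PySem.Dict.empty 0 (((0, 0), -1) :: pvPairs 0 0 0 nums)
      = pvDictScan (PySem.Dict.empty.insert (0, 0) (-1)) 0 (pvPairs 0 0 0 nums) := by
    simp [pvDictScan, PySem.Dict.contains_empty]
  rw [← h0]
  rw [pvDictScan_spec (((0, 0), -1) :: pvPairs 0 0 0 nums) _ [] PySem.Dict.empty 0 rfl
    (by intro st; simp [PySem.Dict.get?_empty]) le_rfl]
  rfl


-- ---- pvBef basic facts ----
theorem pvBef_true_iff (a b : PvP) :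
    pvBef a b = true ↔ (a.1.1 < b.1.1 ∨ (a.1.1 = b.1.1 ∧ a.1.2 < b.1.2)) := by
  simp [pvBef]
  omega

theorem pvBef_false_iff (a b : PvP) :
    pvBef a b = false ↔ (b.1.1 < a.1.1 ∨ (a.1.1 = b.1.1 ∧ b.1.2 ≤ a.1.2)) := by
  rw [← Bool.not_eq_true, pvBef_true_iff]
  omega

theorem pvBef_asymm {a b : PvP} (h : pvBef a b = true) : pvBef b a = false := by
  rw [pvBef_true_iff] at h; rw [pvBef_false_iff]; omega

theorem pvBef_trans {a b c : PvP} (h1 : pvBef a b = true) (h2 : pvBef b c = true) :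
    pvBef a c = true := by
  rw [pvBef_true_iff] at *; omega

theorem pvBef_congr_left {a a' b : PvP} (h : a.1 = a'.1) : pvBef a b = pvBef a' b := by
  simp [pvBef, h]

-- ---- insertion sort: order and stability ----
theorem pvIns_pairwise (x : PvP) : ∀ ys : List PvP,
    ys.Pairwise (fun a b => pvBef b a = false) →
    (PySem.List.insertBy pvBef x ys).Pairwise (fun a b => pvBef b a = false) := by
  intro ys
  induction ys with
  | nil => intro _; simp [PySem.List.insertBy]
  | cons y t ih =>
    intro hp
    rw [List.pairwise_cons] at hp
    obtain ⟨hy, ht⟩ := hp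
    simp only [PySem.List.insertBy]
    split
    · rename_i hxy
      refine List.Pairwise.cons ?_ (List.Pairwise.cons hy ht)
      intro z hz
      rcases List.mem_cons.mp hz with rfl | hz
      · exact pvBef_asymm hxy
      · by_contra hc
        rw [Bool.not_eq_false] at hc
        have := pvBef_trans hc hxy
        rw [hy z hz] at this
        exact Bool.false_ne_true this
    · rename_i hxy
      refine List.Pairwise.cons ?_ (ih ht)
      intro w hw
      rcases (PySem.List.mem_insertBy pvBef x w t).mp hw with rfl | hw
      · exact Bool.eq_false_iff.mpr hxy
      · exact hy w hw

theorem pvIns_filter (x : PvP) (c : Int × Int) : ∀ ys : List PvP,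
    ys.Pairwise (fun a b => pvBef b a = false) →
    (PySem.List.insertBy pvBef x ys).filter (fun p => p.1 == c) =
      (if x.1 == c then ys.filter (fun p => p.1 == c) ++ [x] else ys.filter (fun p => p.1 == c)) := by
  intro ys
  induction ys with
  | nil =>
    intro _
    simp only [PySem.List.insertBy, List.filter]
    split <;> simp_all
  | cons y t ih =>
    intro hp
    rw [List.pairwise_cons] at hp
    obtain ⟨hy, ht⟩ := hp
    simp only [PySem.List.insertBy]
    split
    · rename_i hxy
      by_cases hxc : x.1 = c
      · have hfilt : (y :: t).filter (fun p => p.1 == c) = [] := by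
          rw [List.filter_eq_nil_iff]
          intro z hz
          simp only [beq_iff_eq]
          intro hzc
          have hzx : z.1 = x.1 := by rw [hzc, hxc]
          rcases List.mem_cons.mp hz with rfl | hz
          · rw [pvBef_congr_left hzx.symm, pvBef_true_iff] at hxy
            omega
          · have h1 := hy z hz
            rw [pvBef_congr_left hzx] at h1
            rw [h1] at hxy
            exact Bool.false_ne_true hxy
        rw [List.filter_cons_of_pos (by simp [hxc]), hfilt, if_pos (by simp [hxc])]
        rfl
      · rw [List.filter_cons_of_neg (by simp [hxc]), if_neg (by simp [hxc])]
    · rename_i hxy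
      rw [List.filter_cons, ih ht]
      by_cases hyc : y.1 = c <;> by_cases hxc : x.1 = c <;>
        simp [hyc, hxc, List.filter_cons]

theorem pvSortFold (l : List PvP) : ∀ acc : List PvP,
    acc.Pairwise (fun a b => pvBef b a = false) →
    (l.foldl (fun acc x => PySem.List.insertBy pvBef x acc) acc).Pairwise
        (fun a b => pvBef b a = false) ∧
    ∀ c, (l.foldl (fun acc x => PySem.List.insertBy pvBef x acc) acc).filter (fun p => p.1 == c) =
      acc.filter (fun p => p.1 == c) ++ l.filter (fun p => p.1 == c) := by
  induction l with
  | nil => intro acc h; exact ⟨h, fun c => by simp⟩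
  | cons x t ih =>
    intro acc h
    have hins := pvIns_pairwise x acc h
    obtain ⟨h1, h2⟩ := ih (PySem.List.insertBy pvBef x acc) hins
    refine ⟨h1, fun c => ?_⟩
    rw [List.foldl_cons] at *
    rw [h2 c, pvIns_filter x c acc h, List.filter_cons]
    by_cases hxc : x.1 = c <;> simp [hxc]

theorem pvSorted_eq (ps : List PvP) :
    PySem.List.sorted2 ps (fun p => p.1.1) (fun p => p.1.2) false =
      ps.foldl (fun acc x => PySem.List.insertBy pvBef x acc) [] := rfl

-- ---- pvS machinery ----
theorem pvFirst_cons_of_ne (x : PvP) (l : List PvP) (st : Int × Int) (h : x.1 ≠ st) :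
    pvFirst (x :: l) st = pvFirst l st := by
  unfold pvFirst
  rw [List.find?_cons_of_neg (by simp [h])]

theorem pvFirst_cons_self (x : PvP) (l : List PvP) :
    pvFirst (x :: l) x.1 = x.2 := by
  unfold pvFirst
  rw [List.find?_cons_of_pos (by simp)]
  rfl

theorem pvFirst_eq_of_filter_eq {zs ps : List PvP}
    (h : ∀ c, zs.filter (fun p => p.1 == c) = ps.filter (fun p => p.1 == c)) (st : Int × Int) :
    pvFirst zs st = pvFirst ps st := by
  unfold pvFirst
  rw [← List.head?_filter, ← List.head?_filter, h st]

theorem pvS_congr {zs ps : List PvP} (hperm : zs.Perm ps)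
    (h : ∀ c, zs.filter (fun p => p.1 == c) = ps.filter (fun p => p.1 == c)) :
    pvS zs = pvS ps := by
  unfold pvS
  have hf : ∀ (a : Int), ∀ p ∈ zs, max a (p.2 - pvFirst zs p.1) = max a (p.2 - pvFirst ps p.1) := by
    intro a p _
    rw [pvFirst_eq_of_filter_eq h]
  rw [PySem.List.foldl_congr_mem zs _ (fun a p => max a (p.2 - pvFirst ps p.1)) 0 hf]
  rw [← List.foldl_map (f := fun p : PvP => p.2 - pvFirst ps p.1) (g := max),
      ← List.foldl_map (f := fun p : PvP => p.2 - pvFirst ps p.1) (g := max)]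
  exact (hperm.map _).foldl_eq 0

theorem pvS_nonneg (ps : List PvP) : 0 ≤ pvS ps := by
  unfold pvS
  have := PySem.List.le_foldl_max_int ps (fun p => p.2 - pvFirst ps p.1) 0
  exact this.1

theorem pvFoldlMax_out (t : List PvP) (h : PvP → Int) :
    ∀ b c : Int, t.foldl (fun a q => max a (h q)) (max b c) =
      max (t.foldl (fun a q => max a (h q)) b) c := by
  induction t with
  | nil => intro b c; rfl
  | cons q t ih =>
    intro b c
    rw [List.foldl_cons, List.foldl_cons]
    have : max (max b c) (h q) = max (max b (h q)) c := by omega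
    rw [this, ih]

theorem pvS_swap (x p : PvP) (t : List PvP) (hkey : p.1 = x.1) :
    pvS (x :: p :: t) = max (pvS (x :: t)) (p.2 - x.2) := by
  unfold pvS
  rw [List.foldl_cons, List.foldl_cons, List.foldl_cons]
  have hx : pvFirst (x :: p :: t) x.1 = x.2 := pvFirst_cons_self _ _
  have hp : pvFirst (x :: p :: t) p.1 = x.2 := by rw [hkey]; exact hx
  have hx' : pvFirst (x :: t) x.1 = x.2 := pvFirst_cons_self _ _
  rw [hx, hx', hp]
  have hcong : ∀ (a : Int), ∀ q ∈ t,
      max a (q.2 - pvFirst (x :: p :: t) q.1) = max a (q.2 - pvFirst (x :: t) q.1) := by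
    intro a q _
    by_cases hq : q.1 = x.1
    · rw [hq, hx, hx']
    · rw [pvFirst_cons_of_ne x _ _ (fun hh => hq hh.symm),
          pvFirst_cons_of_ne p _ _ (fun hh => hq (hkey ▸ hh).symm),
          pvFirst_cons_of_ne x _ _ (fun hh => hq hh.symm)]
  rw [PySem.List.foldl_congr_mem t _ (fun a q => max a (q.2 - pvFirst (x :: t) q.1)) _ hcong]
  rw [pvFoldlMax_out]

theorem pvS_drop (x p : PvP) (t : List PvP) (hne : p.1 ≠ x.1)
    (hall : ∀ q ∈ t, q.1 ≠ x.1) :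
    pvS (x :: p :: t) = pvS (p :: t) := by
  unfold pvS
  rw [List.foldl_cons]
  rw [pvFirst_cons_self]
  have h00 : max 0 (x.2 - x.2) = (0 : Int) := by omega
  rw [h00]
  have hcong : ∀ (a : Int), ∀ q ∈ (p :: t),
      max a (q.2 - pvFirst (x :: p :: t) q.1) = max a (q.2 - pvFirst (p :: t) q.1) := by
    intro a q hq
    have hqx : q.1 ≠ x.1 := by
      rcases List.mem_cons.mp hq with rfl | hq
      · exact hne
      · exact hall q hq
    rw [pvFirst_cons_of_ne x _ _ (fun hh => hqx hh.symm)]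
  exact PySem.List.foldl_congr_mem (p :: t) _ (fun a q => max a (q.2 - pvFirst (p :: t) q.1)) _ hcong

-- ---- the run scan over a grouped list ----
def pvR (a b : PvP) : Prop :=
  a.1 = b.1 ∨ (a.1.1 < b.1.1 ∨ (a.1.1 = b.1.1 ∧ a.1.2 < b.1.2))

theorem pvR_of_bef {a b : PvP} (h : pvBef b a = false) : pvR a b := by
  rw [pvBef_false_iff] at h
  unfold pvR
  rcases h with h | h
  · omega
  · by_cases h2 : a.1.2 < b.1.2
    · right; omega
    · left
      have : a.1.2 = b.1.2 := by omega
      exact Prod.ext h.1.symm (by omega)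

theorem pvScan_spec : ∀ (t : List PvP) (st : Int × Int) (fst a : Int), 0 ≤ a →
    ((⟨st, fst⟩ :: t) : List PvP).Pairwise pvR →
    (t.foldl
      (fun (acc : (Int × Int) × Int × Int) p =>
        if p.1 == acc.1 then (acc.1, acc.2.1, max acc.2.2 (p.2 - acc.2.1))
        else (p.1, p.2, acc.2.2))
      (st, fst, a)).2.2 = max a (pvS (⟨st, fst⟩ :: t)) := by
  intro t
  induction t with
  | nil =>
    intro st fst a ha _
    have : pvS [(⟨st, fst⟩ : PvP)] = 0 := by
      unfold pvS
      rw [List.foldl_cons, pvFirst_cons_self]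
      simp
    simp only [List.foldl_nil, this]
    omega
  | cons p t ih =>
    intro st fst a ha hp
    rw [List.foldl_cons]
    by_cases hkey : p.1 = st
    · rw [if_pos (by simp [hkey])]
      have htail : ((⟨st, fst⟩ :: t) : List PvP).Pairwise pvR :=
        hp.sublist (List.cons_sublist_cons.mpr (List.sublist_cons_self p t))
      rw [ih st fst (max a (p.2 - fst)) (le_max_of_le_left ha) htail]
      rw [pvS_swap (⟨st, fst⟩ : PvP) p t hkey]
      omega
    · rw [if_neg (by simp [hkey])]
      have hhead := (List.pairwise_cons.mp hp).1
      have htail := (List.pairwise_cons.mp hp).2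
      have hallne : ∀ q ∈ t, q.1 ≠ st := by
        intro q hq hqst
        have h1 : pvR (⟨st, fst⟩ : PvP) p := hhead p (List.mem_cons_self ..)
        have h2 : pvR p q := (List.pairwise_cons.mp htail).1 q hq
        rcases h1 with h1 | h1
        · exact hkey h1.symm
        · rcases h2 with h2 | h2
          · rw [h2, hqst] at h1
            simp at h1
          · rw [hqst] at h2
            simp at h1 h2
            omega
      have : (p :: t).Pairwise pvR := htail
      have hres := ih p.1 p.2 a ha (by simpa using this)
      rw [hres]
      rw [pvS_drop (⟨st, fst⟩ : PvP) p t hkey hallne]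

theorem pvB_eq_S (nums : List Int) :
    maxBalancedSubarray_alt nums = pvS ((((0, 0), -1) : PvP) :: pvPairs 0 0 0 nums) := by
  have hps : ([(((0, 0), -1) : PvP)] ++ pvPairs 0 0 0 nums)
      = (((0, 0), -1) : PvP) :: pvPairs 0 0 0 nums := List.singleton_append
  simp only [maxBalancedSubarray_alt]
  rw [pvB_loop, hps]
  set ps : List PvP := (((0, 0), -1) : PvP) :: pvPairs 0 0 0 nums with hpsdef
  have hfold := pvSortFold ps [] (List.Pairwise.nil)
  rw [← pvSorted_eq ps] at hfold
  obtain ⟨hpw, hfilt⟩ := hfold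
  have hperm := PySem.List.sorted2_perm ps (fun p : PvP => p.1.1) (fun p : PvP => p.1.2) false
  have hne : PySem.List.sorted2 ps (fun p : PvP => p.1.1) (fun p : PvP => p.1.2) false ≠ [] := by
    intro h
    have := hperm.length_eq
    rw [h] at this
    simp [hpsdef] at this
  cases hzs : PySem.List.sorted2 ps (fun p : PvP => p.1.1) (fun p : PvP => p.1.2) false with
  | nil => exact absurd hzs hne
  | cons h t =>
    rw [hzs] at hpw hfilt hperm
    have hpwR : ((⟨h.1, h.2⟩ :: t) : List PvP).Pairwise pvR := by
      rw [Prod.mk.eta]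
      exact hpw.imp (fun hb => pvR_of_bef hb)
    have := pvScan_spec t h.1 h.2 0 le_rfl hpwR
    rw [Prod.mk.eta] at this
    dsimp only
    rw [this]
    have hS : pvS (h :: t) = pvS ps := pvS_congr hperm (fun c => by rw [hfilt c]; simp)
    rw [hS]
    have := pvS_nonneg ps
    omega

-- ===== VERDICT (by name: the statement is the Claim_ definition above) =====
theorem maxBalancedSubarray_spec : Claim_equal_maxBalancedSubarray := by
  intro nums _
  unfold Spec_maxBalancedSubarray
  rw [pvA_eq_S, pvB_eq_S]
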